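-- pv_equiv track=rewrite | github.com/m1nnh/Problem-Solving | Programmers/모음 사전.py | solution
-- ===== SOURCE A (Python) =====
-- def solution(word):
--     answer = 0
--     word_dic = {"E": 1, "I": 2, "O": 3, "U": 4}
--
--     for i in range(len(word)):
--         if word[i] == "A":
--             answer += 1
--         else:
--             for j in range(4, i, -1):
--                 answer += (5 ** (j - i)) * word_dic[word[i]]
--             answer += word_dic[word[i]] + 1
--
--     return answer
-- ===== SOURCE B (Python) =====
-- def solution(word):
--     val = {"A": 0, "E": 1, "I": 2, "O": 3, "U": 4}
--     answer = 0
--     for i, c in enumerate(word):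
--         answer += val[c] * ((5 ** (max(0, 4 - i) + 1) - 1) // 4) + 1
--     return answer
-- ===== Notes on version B (the rewrite author's own statement) =====
-- stated objective: simpler
-- what changed: Replaces the special 'A' branch and the inner countdown loop adding powers of 5 with a single pass that adds val[c]*group+1 per letter, where group is the geometric-series count in closed form (5**(max(0,4-i)+1)-1)//4.
import Mathlib
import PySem

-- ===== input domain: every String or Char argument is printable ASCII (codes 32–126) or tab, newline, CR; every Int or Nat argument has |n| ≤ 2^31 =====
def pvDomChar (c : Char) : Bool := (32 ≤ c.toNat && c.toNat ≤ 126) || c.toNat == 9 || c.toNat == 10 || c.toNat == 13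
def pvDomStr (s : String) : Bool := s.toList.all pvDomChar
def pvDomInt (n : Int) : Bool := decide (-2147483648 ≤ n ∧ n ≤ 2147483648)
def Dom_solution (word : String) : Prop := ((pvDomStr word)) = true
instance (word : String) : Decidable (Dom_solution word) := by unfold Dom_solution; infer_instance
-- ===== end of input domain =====

-- B replaces A's special 'A' branch and inner countdown loop of powers of 5 by one pass
-- adding val[c]*group+1, group being the geometric-series count in closed form (simpler).


-- ===== PORT A =====
def solution (word : String) : Int :=
  let cs := word.toList
  let word_dic : PySem.Dict Char Int :=
    PySem.Dict.ofList [('E', 1), ('I', 2), ('O', 3), ('U', 4)]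
  (PySem.List.pyRange 0 (cs.length : Int) 1).foldl (fun answer i =>
    if PySem.List.pyGetD cs i ' ' = 'A' then
      answer + 1
    else
      let v := PySem.Dict.getD word_dic (PySem.List.pyGetD cs i ' ') 0
      let answer := (PySem.List.pyRange 4 i (-1)).foldl
        (fun a j => a + 5 ^ (j - i).toNat * v) answer
      answer + (v + 1)) 0

-- ===== PORT B =====
def solution_alt (word : String) : Int :=
  let val : PySem.Dict Char Int :=
    PySem.Dict.ofList [('A', 0), ('E', 1), ('I', 2), ('O', 3), ('U', 4)]
  (PySem.List.enumerate word.toList 0).foldl (fun answer p =>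
    answer + (PySem.Dict.getD val p.2 0 *
      PySem.Int.floordiv (5 ^ (max 0 (4 - p.1) + 1).toNat - 1) 4 + 1)) 0

-- ===== PRECONDITION & SPEC =====
-- Pre_ excludes exactly the words containing a letter outside "AEIOU": there A raises
-- KeyError (dict lookup after the 'A' branch), and B raises KeyError as well.
def Pre_solution (word : String) : Prop :=
  word.toList.all (fun c => decide (c ∈ (['A', 'E', 'I', 'O', 'U'] : List Char))) = true
instance (word : String) : Decidable (Pre_solution word) := by unfold Pre_solution; infer_instance

def pvWitness_solution : String := "EIO"

def Spec_solution (word : String) (out : Int) : Prop := out = solution_alt word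
instance (word : String) (out : Int) : Decidable (Spec_solution word out) := by unfold Spec_solution; infer_instance

-- ===== CLAIM (what is proved, stated in full; the proofs are below) =====
def Claim_equal_solution : Prop := ∀ (word : String), Dom_solution word → Pre_solution word → Spec_solution word (solution word)

-- ===== LEMMAS AND PROOFS =====

-- A's else-branch contribution (geometric sum done by the countdown loop, plus v+1)
-- equals B's closed form v * ((5^(max 0 (4-i)+1) - 1) // 4) + 1.
lemma inner_closed (i v : Int) (h0 : 0 ≤ i) :
    (PySem.List.pyRange 4 i (-1)).foldl (fun a j => a + 5 ^ (j - i).toNat * v) 0 + (v + 1)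
    = v * PySem.Int.floordiv (5 ^ (max 0 (4 - i) + 1).toNat - 1) 4 + 1 := by
  rw [PySem.Int.floordiv_eq_ediv_of_pos (by norm_num)]
  by_cases h4 : (4:Int) ≤ i
  · rw [PySem.List.pyRange_neg_one_eq_nil h4]
    have hm : max 0 (4 - i) = 0 := by omega
    rw [hm]
    norm_num
  · have h4b : i < 4 := by omega
    interval_cases i <;>
      · norm_num [PySem.List.pyRange_neg_one]
        simp only [show Int.toNat 2 = 2 from rfl, show Int.toNat 3 = 3 from rfl,
          show Int.toNat 4 = 4 from rfl, show Int.toNat 5 = 5 from rfl,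
          List.range_succ, List.range_zero]
        norm_num [List.foldl, show Int.toNat 2 = 2 from rfl, show Int.toNat 3 = 3 from rfl,
          show Int.toNat 4 = 4 from rfl, show Int.toNat 5 = 5 from rfl]
        ring

-- the per-index amount A adds equals the per-index amount B adds, for any vowel
lemma perIndex (c : Char) (i : Int) (h0 : 0 ≤ i)
    (hv : c ∈ (['A', 'E', 'I', 'O', 'U'] : List Char)) :
    (if c = 'A' then (1 : Int)
     else
       (PySem.List.pyRange 4 i (-1)).foldl
         (fun a j => a + 5 ^ (j - i).toNat *
            PySem.Dict.getD (PySem.Dict.ofList [('E', 1), ('I', 2), ('O', 3), ('U', 4)]) c 0) 0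
       + (PySem.Dict.getD (PySem.Dict.ofList [('E', 1), ('I', 2), ('O', 3), ('U', 4)]) c 0 + 1))
    = PySem.Dict.getD (PySem.Dict.ofList [('A', 0), ('E', 1), ('I', 2), ('O', 3), ('U', 4)]) c 0 *
        PySem.Int.floordiv (5 ^ (max 0 (4 - i) + 1).toNat - 1) 4 + 1 := by
  fin_cases hv
  · simp
    exact Or.inl (by decide)
  · rw [if_neg (by decide), show PySem.Dict.getD
      ((PySem.Dict.ofList [('E', 1), ('I', 2), ('O', 3), ('U', 4)]) : PySem.Dict Char Int) 'E' 0 = 1 from by decide,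
      show PySem.Dict.getD
      ((PySem.Dict.ofList [('A', 0), ('E', 1), ('I', 2), ('O', 3), ('U', 4)]) : PySem.Dict Char Int) 'E' 0 = 1 from by decide]
    exact inner_closed i 1 h0
  · rw [if_neg (by decide), show PySem.Dict.getD
      ((PySem.Dict.ofList [('E', 1), ('I', 2), ('O', 3), ('U', 4)]) : PySem.Dict Char Int) 'I' 0 = 2 from by decide,
      show PySem.Dict.getD
      ((PySem.Dict.ofList [('A', 0), ('E', 1), ('I', 2), ('O', 3), ('U', 4)]) : PySem.Dict Char Int) 'I' 0 = 2 from by decide]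
    exact inner_closed i 2 h0
  · rw [if_neg (by decide), show PySem.Dict.getD
      ((PySem.Dict.ofList [('E', 1), ('I', 2), ('O', 3), ('U', 4)]) : PySem.Dict Char Int) 'O' 0 = 3 from by decide,
      show PySem.Dict.getD
      ((PySem.Dict.ofList [('A', 0), ('E', 1), ('I', 2), ('O', 3), ('U', 4)]) : PySem.Dict Char Int) 'O' 0 = 3 from by decide]
    exact inner_closed i 3 h0
  · rw [if_neg (by decide), show PySem.Dict.getD
      ((PySem.Dict.ofList [('E', 1), ('I', 2), ('O', 3), ('U', 4)]) : PySem.Dict Char Int) 'U' 0 = 4 from by decide,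
      show PySem.Dict.getD
      ((PySem.Dict.ofList [('A', 0), ('E', 1), ('I', 2), ('O', 3), ('U', 4)]) : PySem.Dict Char Int) 'U' 0 = 4 from by decide]
    exact inner_closed i 4 h0

-- ===== VERDICT (by name: the statement is the Claim_ definition above) =====
theorem solution_spec : Claim_equal_solution := by
  intro word _ hpre0
  have hpre : ∀ c ∈ word.toList, c ∈ (['A', 'E', 'I', 'O', 'U'] : List Char) := by
    intro c hc
    exact of_decide_eq_true (List.all_eq_true.mp hpre0 c hc)
  unfold Spec_solution
  simp only [solution, solution_alt]
  rw [PySem.List.enumerate_eq_map_pyRange word.toList ' ']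
  simp only [PySem.List.len_eq]
  set cs := word.toList with hcs
  have hcong : ∀ (acc : Int) (i : Int), i ∈ PySem.List.pyRange 0 (cs.length : Int) 1 →
      (fun (answer i : Int) =>
        if PySem.List.pyGetD cs i ' ' = 'A' then answer + 1
        else
          (PySem.List.pyRange 4 i (-1)).foldl
            (fun a j => a + 5 ^ (j - i).toNat *
              PySem.Dict.getD ((PySem.Dict.ofList [('E', 1), ('I', 2), ('O', 3), ('U', 4)]) : PySem.Dict Char Int)
                (PySem.List.pyGetD cs i ' ') 0) answer
          + (PySem.Dict.getD ((PySem.Dict.ofList [('E', 1), ('I', 2), ('O', 3), ('U', 4)]) : PySem.Dict Char Int)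
              (PySem.List.pyGetD cs i ' ') 0 + 1)) acc i
      = (fun (answer i : Int) => answer +
          (if PySem.List.pyGetD cs i ' ' = 'A' then (1 : Int)
           else
             (PySem.List.pyRange 4 i (-1)).foldl
               (fun a j => a + 5 ^ (j - i).toNat *
                 PySem.Dict.getD ((PySem.Dict.ofList [('E', 1), ('I', 2), ('O', 3), ('U', 4)]) : PySem.Dict Char Int)
                   (PySem.List.pyGetD cs i ' ') 0) 0
             + (PySem.Dict.getD ((PySem.Dict.ofList [('E', 1), ('I', 2), ('O', 3), ('U', 4)]) : PySem.Dict Char Int)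
                 (PySem.List.pyGetD cs i ' ') 0 + 1))) acc i := by
    intro acc i _
    by_cases h : PySem.List.pyGetD cs i ' ' = 'A'
    · simp [h]
    · simp only [if_neg h]
      rw [PySem.List.foldl_add (g := fun j => 5 ^ (j - i).toNat *
          PySem.Dict.getD ((PySem.Dict.ofList [('E', 1), ('I', 2), ('O', 3), ('U', 4)]) : PySem.Dict Char Int)
            (PySem.List.pyGetD cs i ' ') 0) (a := acc),
        PySem.List.foldl_add (g := fun j => 5 ^ (j - i).toNat *
          PySem.Dict.getD ((PySem.Dict.ofList [('E', 1), ('I', 2), ('O', 3), ('U', 4)]) : PySem.Dict Char Int)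
            (PySem.List.pyGetD cs i ' ') 0) (a := 0)]
      ring
  have hrw := PySem.List.foldl_congr_mem (PySem.List.pyRange 0 (cs.length : Int) 1) _ _ (0:Int) hcong
  rw [hrw]
  rw [List.foldl_map, PySem.List.foldl_add, PySem.List.foldl_add]
  congr 1
  apply congrArg
  apply List.map_congr_left
  intro i hi
  obtain ⟨h0, hlen⟩ := (PySem.List.mem_pyRange_one).mp hi
  have hvm : PySem.List.pyGetD cs i ' ' ∈ cs := by
    rw [PySem.List.pyGetD_eq_getElem (xs := cs) (d := ' ') h0 hlen]
    exact List.getElem_mem _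
  exact perIndex (PySem.List.pyGetD cs i ' ') i h0 (hpre _ hvm)
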